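-- pv_equiv track=rewrite | github.com/bcandroid/Discrete_Optimization | GC_3_hibrit.py | evaluate_coloring
-- ===== SOURCE A (Python) =====
-- def evaluate_coloring(adjacency_matrix, coloring):
--     conflicts = 0
--     num_nodes = len(adjacency_matrix)
--
--     for node in range(num_nodes):
--         for neighbor in range(num_nodes):
--             if adjacency_matrix[node][neighbor] and coloring[neighbor] == coloring[node]:
--                 conflicts += 1
--
--     return conflicts
-- ===== SOURCE B (Python) =====
-- def evaluate_coloring(adjacency_matrix, coloring):
--     n = len(adjacency_matrix)
--     groups = {}
--     for node in range(n):
--         groups.setdefault(coloring[node], []).append(node)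
--     conflicts = 0
--     for group in groups.values():
--         for i in group:
--             row = adjacency_matrix[i]
--             for j in group:
--                 if row[j]:
--                     conflicts += 1
--     return conflicts
-- ===== Notes on version B (the rewrite author's own statement) =====
-- stated objective: faster
-- what changed: B first builds a dict grouping node indices by color, then counts adjacency entries only within each color group, so pairs of differently-colored nodes are never examined; A scans all n^2 ordered pairs with a color comparison per pair.
-- outside the precondition, e.g. on evaluate_coloring([[0, 0], [0, 0]], []): A returns 0, B raises IndexError
import Mathlib
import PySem

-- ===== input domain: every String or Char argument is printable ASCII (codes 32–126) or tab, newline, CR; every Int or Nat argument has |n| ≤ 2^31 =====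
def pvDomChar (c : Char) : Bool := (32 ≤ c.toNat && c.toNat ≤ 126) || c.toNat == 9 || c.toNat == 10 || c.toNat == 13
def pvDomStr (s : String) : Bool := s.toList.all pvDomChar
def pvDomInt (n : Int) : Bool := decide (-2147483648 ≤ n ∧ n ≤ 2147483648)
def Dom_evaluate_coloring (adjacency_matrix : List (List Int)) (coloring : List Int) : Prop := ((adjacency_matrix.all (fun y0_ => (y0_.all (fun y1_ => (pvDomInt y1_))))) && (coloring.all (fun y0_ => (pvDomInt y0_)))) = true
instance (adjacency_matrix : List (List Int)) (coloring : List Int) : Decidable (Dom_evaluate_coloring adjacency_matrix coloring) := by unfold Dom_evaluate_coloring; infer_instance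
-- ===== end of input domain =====

-- B groups the nodes by color once (a dict color -> node list) and counts adjacency only
-- inside each color class, instead of A's scan over all n^2 pairs; return values agree on Pre_.

-- shared indexing helpers (both Pythons index coloring/adjacency the same way; inside Pre_
-- every index is in range, so the `.getD` defaults are never the value used)
def pvC (coloring : List Int) (i : Int) : Int := (PySem.List.pyGet? coloring i).getD 0
def pvE (adjacency_matrix : List (List Int)) (i j : Int) : Int :=
  (PySem.List.pyGet? ((PySem.List.pyGet? adjacency_matrix i).getD []) j).getD 0

-- ===== PORT A =====
def evaluate_coloring (adjacency_matrix : List (List Int)) (coloring : List Int) : Int :=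
  let num_nodes : Int := (adjacency_matrix.length : Int)
  (PySem.List.pyRange 0 num_nodes 1).foldl (fun conflicts node =>
    (PySem.List.pyRange 0 num_nodes 1).foldl (fun conflicts neighbor =>
      if pvE adjacency_matrix node neighbor ≠ 0 ∧
         pvC coloring neighbor = pvC coloring node
      then conflicts + 1 else conflicts) conflicts) 0

-- ===== PORT B =====
def evaluate_coloring_alt (adjacency_matrix : List (List Int)) (coloring : List Int) : Int :=
  let n : Int := (adjacency_matrix.length : Int)
  let groups : PySem.Dict Int (List Int) :=
    (PySem.List.pyRange 0 n 1).foldl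
      (fun d node => d.modify (pvC coloring node) [] (fun g => g ++ [node]))
      PySem.Dict.empty
  groups.values.foldl (fun conflicts group =>
    group.foldl (fun conflicts i =>
      group.foldl (fun conflicts j =>
        if pvE adjacency_matrix i j ≠ 0 then conflicts + 1 else conflicts) conflicts) conflicts) 0

-- ===== PRECONDITION & SPEC =====
-- Pre_ excludes exactly the inputs on which indexing can raise an IndexError: some row of the
-- matrix, or the coloring, is shorter than the number of rows.  (When the adjacency entries
-- guarding the out-of-range coloring lookups are all falsy, A still returns; B raises there.)
def Pre_evaluate_coloring (adjacency_matrix : List (List Int)) (coloring : List Int) : Prop :=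
  (∀ row ∈ adjacency_matrix, adjacency_matrix.length ≤ row.length) ∧
  adjacency_matrix.length ≤ coloring.length
instance (adjacency_matrix : List (List Int)) (coloring : List Int) : Decidable (Pre_evaluate_coloring adjacency_matrix coloring) := by unfold Pre_evaluate_coloring; infer_instance
def pvWitness_evaluate_coloring : List (List Int) × List Int := ([[0, 1], [1, 0]], [1, 1])

def Spec_evaluate_coloring (adjacency_matrix : List (List Int)) (coloring : List Int) (out : Int) : Prop := out = evaluate_coloring_alt adjacency_matrix coloring
instance (adjacency_matrix : List (List Int)) (coloring : List Int) (out : Int) : Decidable (Spec_evaluate_coloring adjacency_matrix coloring out) := by unfold Spec_evaluate_coloring; infer_instance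

-- ===== CLAIM (what is proved, stated in full; the proofs are below) =====
def Claim_equal_evaluate_coloring : Prop := ∀ (adjacency_matrix : List (List Int)) (coloring : List Int), Dom_evaluate_coloring adjacency_matrix coloring → Pre_evaluate_coloring adjacency_matrix coloring → Spec_evaluate_coloring adjacency_matrix coloring (evaluate_coloring adjacency_matrix coloring)

-- ===== LEMMAS AND PROOFS =====

-- a foldl whose step adds g x is the starting value plus the sum of the g's
theorem pv_foldl_sum {γ : Type} (f : Int → γ → Int) (g : γ → Int)
    (h : ∀ a x, f a x = a + g x) :
    ∀ (l : List γ) (a : Int), l.foldl f a = a + (l.map g).sum := by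
  intro l
  induction l with
  | nil => intro a; simp
  | cons x xs ih => intro a; simp [h, ih, add_assoc]

theorem pv_foldl_if {γ : Type} (p : γ → Prop) [DecidablePred p] (l : List γ) (a : Int) :
    l.foldl (fun a x => if p x then a + 1 else a) a
      = a + (l.map (fun x => if p x then (1 : Int) else 0)).sum := by
  apply pv_foldl_sum
  intro a x
  split <;> simp

theorem pv_sum_filter {γ : Type} (p : γ → Bool) (f : γ → Int) (l : List γ) :
    ((l.filter p).map f).sum = (l.map (fun x => if p x then f x else 0)).sum := by
  induction l with
  | nil => rfl
  | cons x xs ih =>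
    by_cases h : p x <;> simp [h, ih]

theorem pv_sum_split {γ : Type} (p : γ → Bool) (f : γ → Int) (l : List γ) :
    ((l.filter p).map f).sum + ((l.filter (fun x => !p x)).map f).sum = (l.map f).sum := by
  induction l with
  | nil => rfl
  | cons x xs ih =>
    by_cases h : p x <;> simp [h, ← ih] <;> ring

-- summing group-by-group over a partition by color equals summing over all elements
theorem pv_partition_sum {γ : Type} (c : γ → Int) (F : Int → γ → Int) :
    ∀ (ds : List Int) (R : List γ), ds.Nodup → (∀ i ∈ R, c i ∈ ds) →
      (ds.map (fun col => ((R.filter (fun i => c i == col)).map (F col)).sum)).sum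
        = (R.map (fun i => F (c i) i)).sum := by
  intro ds
  induction ds with
  | nil =>
    intro R _ hmem
    cases R with
    | nil => rfl
    | cons x xs => exact absurd (hmem x (by simp)) (by simp)
  | cons col ds ih =>
    intro R hnd hmem
    have hnd' : ds.Nodup := hnd.of_cons
    have hcol : col ∉ ds := by
      have := List.nodup_cons.mp hnd; exact this.1
    -- restrict the tail sum to the elements not colored col
    set R' := R.filter (fun i => !(c i == col)) with hR'
    have hfilter : ∀ col' ∈ ds, R.filter (fun i => c i == col')
        = R'.filter (fun i => c i == col') := by
      intro col' h'
      have hne : col' ≠ col := by rintro rfl; exact hcol h'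
      rw [hR', List.filter_filter]
      apply List.filter_congr
      intro x _
      by_cases h : c x = col'
      · simp [h, hne]
      · simp [h]
    have htail : (ds.map (fun col' => ((R.filter (fun i => c i == col')).map (F col')).sum)).sum
        = (ds.map (fun col' => ((R'.filter (fun i => c i == col')).map (F col')).sum)).sum := by
      apply congrArg
      apply List.map_congr_left
      intro col' h'
      rw [hfilter col' h']
    have hmem' : ∀ i ∈ R', c i ∈ ds := by
      intro i hi
      rw [hR'] at hi
      have h1 := List.of_mem_filter hi
      have h2 := List.mem_of_mem_filter hi
      have := hmem i h2
      simp at h1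
      rcases List.mem_cons.mp this with h | h
      · exact absurd h h1
      · exact h
    have hsum : ((R.filter (fun i => c i == col)).map (fun i => F (c i) i)).sum
          + (R'.map (fun i => F (c i) i)).sum = (R.map (fun i => F (c i) i)).sum := by
      rw [hR']; exact pv_sum_split _ _ R
    have hhead : ((R.filter (fun i => c i == col)).map (F col)).sum
        = ((R.filter (fun i => c i == col)).map (fun i => F (c i) i)).sum := by
      apply congrArg
      apply List.map_congr_left
      intro i hi
      have := List.of_mem_filter hi
      rw [show c i = col from by simpa using this]
    simp only [List.map_cons, List.sum_cons]
    rw [htail, ih R' hnd' hmem', hhead, hsum]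

theorem evaluate_coloring_spec : Claim_equal_evaluate_coloring := by
  intro A C _ _
  unfold Spec_evaluate_coloring evaluate_coloring evaluate_coloring_alt
  simp only []
  set n : Int := (A.length : Int) with hn
  set R : List Int := PySem.List.pyRange 0 n 1 with hR
  set c : Int → Int := pvC C with hc
  set e : Int → Int → Int := pvE A with he
  -- the dict of color groups
  set groups : PySem.Dict Int (List Int) :=
    R.foldl (fun d node => d.modify (c node) [] (fun g => g ++ [node])) PySem.Dict.empty
    with hgroups
  have hfold : groups = (R.map (fun i => (c i, i))).foldl
      (fun d p => d.modify p.1 [] (fun g => g ++ [p.2])) PySem.Dict.empty := by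
    rw [hgroups, List.foldl_map]
  -- the group stored under a color is the filter of R by that color
  have hgetD : ∀ col, groups.getD col [] = R.filter (fun i => c i == col) := by
    intro col
    rw [hfold, PySem.Dict.getD_foldl_modify_append]
    simp [List.filter_map, Function.comp_def]
  -- the keys are the distinct colors, in order
  have hkeys : groups.keys = PySem.Set.ofList (R.map c) := by
    rw [hfold, PySem.Dict.keys_foldl_modify_key]
    simp [PySem.Set.update, PySem.Set.ofList_eq_foldl, PySem.Dict.keys_empty, Function.comp_def]
  have hnodup : groups.keys.Nodup := by
    rw [hkeys]; exact PySem.Set.nodup_ofList _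
  have hvalues : groups.values
      = (PySem.Set.ofList (R.map c)).map (fun col => R.filter (fun i => c i == col)) := by
    rw [PySem.Dict.values_eq_map_keys groups hnodup [], hkeys]
    apply List.map_congr_left
    intro col _
    exact hgetD col
  -- both sides as sums
  rw [pv_foldl_sum _ (fun node => ((R.map (fun neighbor =>
        if e node neighbor ≠ 0 ∧ c neighbor = c node then (1 : Int) else 0)).sum))
      (fun a node => pv_foldl_if _ R a) R 0]
  rw [pv_foldl_sum _ (fun group => ((group.map (fun i => ((group.map (fun j =>
        if e i j ≠ 0 then (1 : Int) else 0)).sum))).sum))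
      (fun a group => pv_foldl_sum _ _
        (fun a i => pv_foldl_if (fun j => e i j ≠ 0) group a) group a)
      groups.values 0]
  simp only [zero_add, hvalues, List.map_map]
  -- group-by-color sum = all-pairs sum
  simp only [Function.comp_def]
  rw [pv_partition_sum c
      (fun col i => ((R.filter (fun j => c j == col)).map (fun j =>
          if e i j ≠ 0 then (1:Int) else 0)).sum)
      (PySem.Set.ofList (R.map c)) R (PySem.Set.nodup_ofList _)
      (by intro i hi; rw [PySem.Set.mem_ofList]; exact List.mem_map_of_mem hi)]
  apply congrArg
  apply List.map_congr_left
  intro i _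
  rw [pv_sum_filter]
  apply congrArg
  apply List.map_congr_left
  intro j _
  by_cases h1 : c j = c i <;> by_cases h2 : e i j ≠ 0 <;> simp [h1, h2]
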